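-- pv_equiv track=rewrite | github.com/nanolab-fcfm/laser_setup | Scripts/utils.py | increment_numbers
-- ===== SOURCE A (Python) =====
-- def increment_numbers(input_list):
--     current_number = input_list[0]
--     counter = 1
--     output_list = []
--
--     for num in input_list:
--         if num != current_number:
--             current_number = num
--             counter += 1
--         output_list.append(counter)
--
--     return output_list
-- ===== SOURCE B (Python) =====
-- def increment_numbers(input_list):
--     n = len(input_list)
--     if n == 0:
--         return []
--     if n == 1:
--         return [1]
--     mid = n // 2
--     left = increment_numbers(input_list[:mid])
--     right = increment_numbers(input_list[mid:])
--     offset = left[-1] - (1 if input_list[mid] == input_list[mid - 1] else 0)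
--     return left + [r + offset for r in right]
-- ===== Notes on version B (the rewrite author's own statement) =====
-- stated objective: alternative
-- what changed: Replaced A's single sequential pass with a running counter by a divide-and-conquer recursion: solve each half independently, then merge by shifting the right half's group ids by the left half's last id (minus one when the halves meet inside a run); Pre_ excludes only the empty list, on which A raises IndexError (input_list[0]) while B naturally returns [].
-- outside the precondition, e.g. on increment_numbers([]): A raises IndexError, B returns []
import Mathlib
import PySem

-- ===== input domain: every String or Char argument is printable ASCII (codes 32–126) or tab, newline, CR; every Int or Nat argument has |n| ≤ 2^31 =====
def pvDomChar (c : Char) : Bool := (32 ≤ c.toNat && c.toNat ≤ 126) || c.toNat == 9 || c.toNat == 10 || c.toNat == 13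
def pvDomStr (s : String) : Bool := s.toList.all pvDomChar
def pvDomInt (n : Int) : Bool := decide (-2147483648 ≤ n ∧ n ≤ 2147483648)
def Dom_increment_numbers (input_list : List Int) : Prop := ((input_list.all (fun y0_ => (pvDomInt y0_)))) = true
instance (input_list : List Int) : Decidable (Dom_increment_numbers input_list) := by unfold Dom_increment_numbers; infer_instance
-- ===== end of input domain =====

-- B replaces A's sequential running-counter pass by divide-and-conquer: solve both halves
-- independently, then shift the right half's group ids to merge; objective: alternative algorithm.

-- ===== PORT A =====
-- the for-loop of A: state (current_number, counter, output_list)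
def incA_loop (l : List Int) (cur cnt : Int) (out : List Int) : List Int :=
  match l with
  | [] => out
  | num :: rest =>
    if num ≠ cur then incA_loop rest num (cnt + 1) (out ++ [cnt + 1])
    else incA_loop rest cur cnt (out ++ [cnt])

-- input_list[0] raises IndexError on []; that input is outside Pre_ (the 'none' branch is arbitrary)
def increment_numbers (input_list : List Int) : List Int :=
  match PySem.List.pyGet? input_list 0 with
  | none => []
  | some cur => incA_loop input_list cur 1 []

-- ===== PORT B =====
-- Python B's divide-and-conquer.  Here n ≥ 2, so mid = n // 2 satisfies 1 ≤ mid < n: the slices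
-- input_list[:mid] / input_list[mid:] are exactly take/drop, n // 2 is Nat division, the accesses
-- input_list[mid], input_list[mid-1] are in range (getD is exact there), and left[-1] is the last
-- element of the nonempty left result (getLastD is exact there).
def increment_numbers_alt (input_list : List Int) : List Int :=
  if input_list.length = 0 then []
  else if input_list.length = 1 then [1]
  else
    let mid := input_list.length / 2
    let left := increment_numbers_alt (input_list.take mid)
    let right := increment_numbers_alt (input_list.drop mid)
    let offset := left.getLastD 0 -
      (if input_list.getD mid 0 == input_list.getD (mid - 1) 0 then 1 else 0)
    left ++ right.map (fun r => r + offset)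
termination_by input_list.length
decreasing_by
  · simp only [List.length_take]; omega
  · simp only [List.length_drop]; omega

-- ===== PRECONDITION & SPEC =====
-- Pre_ excludes only the empty list, on which A raises IndexError (input_list[0]).
def Pre_increment_numbers (input_list : List Int) : Prop := input_list ≠ []
instance (input_list : List Int) : Decidable (Pre_increment_numbers input_list) := by
  unfold Pre_increment_numbers; infer_instance

def pvWitness_increment_numbers : List Int := ([1, 1, 2, 2, 2, 1])

def Spec_increment_numbers (input_list : List Int) (out : List Int) : Prop := out = increment_numbers_alt input_list
instance (input_list : List Int) (out : List Int) : Decidable (Spec_increment_numbers input_list out) := by unfold Spec_increment_numbers; infer_instance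

-- ===== CLAIM (what is proved, stated in full; the proofs are below) =====
def Claim_equal_increment_numbers : Prop := ∀ (input_list : List Int), Dom_increment_numbers input_list → Pre_increment_numbers input_list → Spec_increment_numbers input_list (increment_numbers input_list)

-- ===== LEMMAS AND PROOFS =====

-- reference function: the group sequence for the tail, given the previous element and its group
def specG (prev : Int) (g : Int) : List Int → List Int
  | [] => []
  | x :: rest => if x ≠ prev then (g + 1) :: specG x (g + 1) rest else g :: specG prev g rest

-- reference result: group sequence of the whole list
def refF : List Int → List Int
  | [] => []
  | x :: xs => 1 :: specG x 1 xs

theorem incA_loop_spec (l : List Int) (cur cnt : Int) (out : List Int) :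
    incA_loop l cur cnt out = out ++ specG cur cnt l := by
  induction l generalizing cur cnt out with
  | nil => simp [incA_loop, specG]
  | cons x rest ih =>
    rw [incA_loop, specG]
    split
    · rw [ih]; simp
    · rw [ih]; simp

theorem specG_shift (l : List Int) : ∀ (p g d : Int),
    specG p (g + d) l = (specG p g l).map (fun r => r + d) := by
  induction l with
  | nil => intro p g d; simp [specG]
  | cons x rest ih =>
    intro p g d
    by_cases h : x = p
    · rw [specG, if_neg (by simp [h]), specG, if_neg (by simp [h]), List.map_cons, ih]
    · rw [specG, if_pos (by simp [h]), specG, if_pos (by simp [h]), List.map_cons]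
      have e : g + d + 1 = g + 1 + d := by ring
      rw [e, ih]

theorem specG_append (l1 : List Int) : ∀ (l2 : List Int) (p g : Int),
    specG p g (l1 ++ l2) =
      specG p g l1 ++ specG (l1.getLastD p) ((specG p g l1).getLastD g) l2 := by
  induction l1 with
  | nil => intro l2 p g; simp [specG]
  | cons x xs ih =>
    intro l2 p g
    by_cases h : x = p
    · subst h
      rw [List.cons_append, specG, if_neg (by simp), specG, if_neg (by simp),
        List.getLastD_cons, List.getLastD_cons, ih, List.cons_append]
    · rw [List.cons_append, specG, if_pos (by simp [h]), specG, if_pos (by simp [h]),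
        List.getLastD_cons, List.getLastD_cons, ih, List.cons_append]

theorem specG_head (y : Int) (ys : List Int) (p g : Int) :
    specG p g (y :: ys) =
      (if y = p then g else g + 1) :: specG y (if y = p then g else g + 1) ys := by
  by_cases h : y = p
  · simp [specG, h]
  · simp [specG, h]

theorem getLastD_eq_getD (l : List Int) (d : Int) (h : l ≠ []) :
    l.getLastD d = l.getD (l.length - 1) 0 := by
  rcases l with _ | ⟨x, xs⟩
  · exact absurd rfl h
  have hlt : (x :: xs).length - 1 < (x :: xs).length := by simp
  rw [List.getLastD_eq_getLast?, List.getLast?_eq_getElem?, List.getD_eq_getElem?_getD,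
    List.getElem?_eq_getElem hlt]
  rfl

-- the merge law: the group sequence of l1 ++ l2 is refF l1 followed by refF l2 shifted
theorem refF_merge (l1 l2 : List Int) (h1 : l1 ≠ []) (h2 : l2 ≠ []) :
    refF (l1 ++ l2) =
      refF l1 ++ (refF l2).map (fun r =>
        r + ((refF l1).getLastD 0 -
          (if l2.getD 0 0 == l1.getD (l1.length - 1) 0 then 1 else 0))) := by
  rcases l1 with _ | ⟨x, xs⟩
  · exact absurd rfl h1
  rcases l2 with _ | ⟨y, ys⟩
  · exact absurd rfl h2
  have hF : refF (x :: xs) = 1 :: specG x 1 xs := rfl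
  show refF ((x :: xs) ++ (y :: ys)) = _
  have step1 : refF ((x :: xs) ++ (y :: ys)) =
      1 :: specG x 1 (xs ++ (y :: ys)) := rfl
  rw [step1, specG_append]
  set P := xs.getLastD x with hP
  set G := (specG x 1 xs).getLastD 1 with hG
  -- the last element of refF (x::xs) is G, the last element of x::xs is P
  have hlastF : (refF (x :: xs)).getLastD 0 = G := by
    rw [hF, List.getLastD_cons, hG]
  have hlastL : (x :: xs).getD ((x :: xs).length - 1) 0 = P := by
    rw [← getLastD_eq_getD (x :: xs) x (by simp), List.getLastD_cons, hP]
  rw [specG_head]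
  set g0 : Int := if y = P then G else G + 1 with hg0
  have hoff : (refF (x :: xs)).getLastD 0 -
      (if (y :: ys).getD 0 0 == (x :: xs).getD ((x :: xs).length - 1) 0 then 1 else 0) =
      g0 - 1 := by
    rw [hlastF, List.getD_cons_zero, hlastL, hg0]
    by_cases h : y = P <;> simp [h]
  rw [hoff]
  have hmap : (refF (y :: ys)).map (fun r => r + (g0 - 1)) = g0 :: specG y g0 ys := by
    show ((1 : Int) :: specG y 1 ys).map (fun r => r + (g0 - 1)) = g0 :: specG y g0 ys
    rw [List.map_cons]
    have hsh := specG_shift ys y 1 (g0 - 1)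
    have h1 : (1 : Int) + (g0 - 1) = g0 := by ring
    rw [h1] at hsh
    rw [← hsh, h1]
  rw [hmap, hF]
  rfl

-- B computes refF (strong induction on length)
theorem alt_eq_refF (n : Nat) : ∀ (l : List Int), l.length ≤ n →
    increment_numbers_alt l = refF l := by
  induction n with
  | zero =>
    intro l h
    have : l = [] := List.eq_nil_of_length_eq_zero (by omega)
    subst this
    rw [increment_numbers_alt]
    simp [refF]
  | succ m ih =>
    intro l h
    rw [increment_numbers_alt]
    by_cases h0 : l.length = 0
    · rw [if_pos h0]
      have : l = [] := List.eq_nil_of_length_eq_zero h0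
      subst this; simp [refF]
    rw [if_neg h0]
    by_cases h1 : l.length = 1
    · rw [if_pos h1]
      rcases l with _ | ⟨x, xs⟩
      · simp at h0
      · simp only [List.length_cons] at h1
        have hx : xs = [] := List.eq_nil_of_length_eq_zero (by omega)
        subst hx
        simp [refF, specG]
    rw [if_neg h1]
    show increment_numbers_alt (l.take (l.length / 2)) ++
        (increment_numbers_alt (l.drop (l.length / 2))).map
          (fun r => r + ((increment_numbers_alt (l.take (l.length / 2))).getLastD 0 -
            (if l.getD (l.length / 2) 0 == l.getD (l.length / 2 - 1) 0 then 1 else 0))) = refF l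
    have hn2 : 2 ≤ l.length := by omega
    set mid := l.length / 2 with hmid
    have hm1 : 1 ≤ mid := by omega
    have hmlt : mid < l.length := by omega
    have htake : (l.take mid).length = mid := by simp; omega
    have hdrop : (l.drop mid).length = l.length - mid := by simp
    rw [ih (l.take mid) (by omega), ih (l.drop mid) (by omega)]
    have htne : l.take mid ≠ [] := by
      intro hc; rw [hc] at htake; simp at htake; omega
    have hdne : l.drop mid ≠ [] := by
      intro hc; rw [hc] at hdrop; simp at hdrop; omega
    have hsplit : l = l.take mid ++ l.drop mid := (List.take_append_drop mid l).symm
    have e1 : (l.drop mid).getD 0 0 = l.getD mid 0 := by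
      rw [List.getD_eq_getElem?_getD, List.getD_eq_getElem?_getD, List.getElem?_drop,
        Nat.add_zero]
    have e2 : (l.take mid).getD ((l.take mid).length - 1) 0 = l.getD (mid - 1) 0 := by
      rw [htake, List.getD_eq_getElem?_getD, List.getD_eq_getElem?_getD,
        List.getElem?_take_of_lt (by omega)]
    conv_rhs => rw [hsplit]
    rw [refF_merge (l.take mid) (l.drop mid) htne hdne, e1, e2]

-- ===== VERDICT (by name: the statement is the Claim_ definition above) =====
theorem increment_numbers_spec : Claim_equal_increment_numbers := by
  intro l _ hpre
  unfold Spec_increment_numbers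
  rcases l with _ | ⟨x, xs⟩
  · exact absurd rfl hpre
  rw [alt_eq_refF (x :: xs).length (x :: xs) (le_refl _)]
  show increment_numbers (x :: xs) = refF (x :: xs)
  unfold increment_numbers
  rw [PySem.List.pyGet?_zero_cons]
  show incA_loop (x :: xs) x 1 [] = refF (x :: xs)
  rw [incA_loop_spec]
  simp only [List.nil_append]
  show specG x 1 (x :: xs) = refF (x :: xs)
  rw [specG, if_neg (by simp)]
  rfl
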